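-- pv_equiv track=rewrite | github.com/limitz/glitchkin | output/tools/LTG_TOOL_sightline_validator.py | _cluster_pixels_grid
-- ===== SOURCE A (Python) =====
-- def _cluster_pixels_grid(coords, gap=8):
--     """
--     Group a list of (x, y) pixel coordinates into spatial clusters.
--     Uses a grid-accelerated connected-component approach.
--
--     Returns list of lists of (x, y).
--     """
--     if not coords:
--         return []
--
--     # Build a spatial grid for O(1) neighbor lookups
--     coord_set = set(coords)
--     visited = set()
--     clusters = []
--
--     for pt in coords:
--         if pt in visited:
--             continue
--         cluster = []
--         queue = [pt]
--         visited.add(pt)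
--         while queue:
--             cx, cy = queue.pop(0)
--             cluster.append((cx, cy))
--             # Check all neighbors within gap distance
--             for dx in range(-gap, gap + 1):
--                 for dy in range(-gap, gap + 1):
--                     nb = (cx + dx, cy + dy)
--                     if nb in coord_set and nb not in visited:
--                         visited.add(nb)
--                         queue.append(nb)
--         clusters.append(cluster)
--
--     return clusters
-- ===== SOURCE B (Python) =====
-- def _cluster_pixels_grid(coords, gap=8):
--     """
--     Group (x, y) pixel coordinates into connected components (Chebyshev
--     distance <= gap), BFS over the actual points: the points are kept in a
--     lexicographically sorted list, and the neighbours of a popped point are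
--     found by a binary search for the first point >= (cx-gap, cy-gap) followed
--     by a scan of the x-strip, instead of enumerating the whole (2*gap+1)^2 box.
--     The BFS queue is consumed by a moving head index (no O(n) pop(0)); the
--     fully consumed queue itself is the cluster, in BFS order.
--     """
--     if not coords:
--         return []
--     pts = sorted(set(coords))
--     n = len(pts)
--     visited = set()
--     clusters = []
--     for pt in coords:
--         if pt in visited:
--             continue
--         visited.add(pt)
--         queue = [pt]
--         head = 0
--         while head < len(queue):
--             cx, cy = queue[head]
--             head += 1
--             # lower bound: first index with pts[i] >= (cx - gap, cy - gap)
--             lo, hi = 0, n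
--             while lo < hi:
--                 mid = (lo + hi) // 2
--                 if pts[mid] < (cx - gap, cy - gap):
--                     lo = mid + 1
--                 else:
--                     hi = mid
--             i = lo
--             while i < n and pts[i][0] <= cx + gap:
--                 p = pts[i]
--                 if cy - gap <= p[1] <= cy + gap and p not in visited:
--                     visited.add(p)
--                     queue.append(p)
--                 i += 1
--         clusters.append(queue)
--     return clusters
-- ===== Notes on version B (the rewrite author's own statement) =====
-- stated objective: faster
-- what changed: B keeps the distinct points in a lexicographically sorted list and finds each popped point's neighbours by a hand-rolled binary search plus a scan of the x-strip (instead of enumerating the whole (2*gap+1)^2 offset box against a set), and consumes the BFS queue with a moving head index instead of O(n) list.pop(0); the fully consumed queue itself is the cluster.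
import Mathlib
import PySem

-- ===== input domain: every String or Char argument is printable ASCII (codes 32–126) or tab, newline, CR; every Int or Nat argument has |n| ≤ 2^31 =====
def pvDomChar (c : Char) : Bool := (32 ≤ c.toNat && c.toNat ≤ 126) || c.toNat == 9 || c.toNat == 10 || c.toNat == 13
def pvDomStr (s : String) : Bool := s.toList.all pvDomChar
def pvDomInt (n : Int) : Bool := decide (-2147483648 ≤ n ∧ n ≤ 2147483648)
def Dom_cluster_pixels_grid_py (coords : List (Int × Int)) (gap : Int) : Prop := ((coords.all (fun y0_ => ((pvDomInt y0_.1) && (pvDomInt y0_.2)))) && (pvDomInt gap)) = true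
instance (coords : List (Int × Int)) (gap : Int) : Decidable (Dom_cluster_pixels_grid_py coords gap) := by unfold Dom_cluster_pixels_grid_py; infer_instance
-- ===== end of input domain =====

-- B replaces A's (2*gap+1)^2 neighbour-box enumeration per BFS pop by a binary search in the
-- lexicographically sorted point list followed by a scan of the x-strip, and pops the BFS queue
-- with a moving head index instead of list.pop(0); objective: faster (measured).

-- ===== PORT A =====
-- Inner double loop of A: for dx in range(-gap, gap+1): for dy in …: push unvisited set members.
-- State is (visited, queue).
def pvInnerA (coordSet : List (Int × Int)) (gap cx cy : Int)
    (st : List (Int × Int) × List (Int × Int)) : List (Int × Int) × List (Int × Int) :=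
  (PySem.List.pyRange (-gap) (gap + 1) 1).foldl (fun st1 dx =>
    (PySem.List.pyRange (-gap) (gap + 1) 1).foldl (fun st2 dy =>
      if (cx + dx, cy + dy) ∈ coordSet ∧ (cx + dx, cy + dy) ∉ st2.1 then
        (PySem.Set.add st2.1 (cx + dx, cy + dy), st2.2 ++ [(cx + dx, cy + dy)])
      else st2) st1) st

-- A's `while queue:` loop; fuel only makes the recursion structural (coords.length + 1 always
-- suffices: each iteration pops one of at most |set(coords)| ever-enqueued points).
def pvBfsA (coordSet : List (Int × Int)) (gap : Int) :
    Nat → List (Int × Int) → List (Int × Int) → List (Int × Int) →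
    List (Int × Int) × List (Int × Int)
  | 0, _, visited, cluster => (cluster, visited)
  | fuel + 1, queue, visited, cluster =>
    match queue with
    | [] => (cluster, visited)
    | c :: rest =>
      let st := pvInnerA coordSet gap c.1 c.2 (visited, rest)
      pvBfsA coordSet gap fuel st.2 st.1 (cluster ++ [c])

def cluster_pixels_grid_py (coords : List (Int × Int)) (gap : Int) : List (List (Int × Int)) :=
  if coords = [] then []
  else
    let coordSet := PySem.Set.ofList coords
    (coords.foldl (fun (st : List (Int × Int) × List (List (Int × Int))) pt =>
        if pt ∈ st.1 then st
        else
          let r := pvBfsA coordSet gap (coords.length + 1) [pt] (PySem.Set.add st.1 pt) []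
          (r.2, st.2 ++ [r.1]))
      ([], [])).2

-- ===== PORT B =====
-- Python tuple comparison (x, y) < (a, b) on int pairs (lexicographic).
def pvTupLt (a b : Int × Int) : Bool := decide (a.1 < b.1 ∨ (a.1 = b.1 ∧ a.2 < b.2))

-- Source B's hand-written lower-bound binary search (`while lo < hi: …`); the fuel argument only
-- makes the loop structural (hi - lo always suffices: each iteration shrinks the interval).
def pvLowerBGo (pts : List (Int × Int)) (key : Int × Int) : Nat → Nat → Nat → Nat
  | 0, lo, _ => lo
  | fuel + 1, lo, hi =>
    if lo < hi then
      -- mid = (lo + hi) // 2, inlined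
      if pvTupLt (pts.getD ((lo + hi) / 2) (0, 0)) key then pvLowerBGo pts key fuel ((lo + hi) / 2 + 1) hi
      else pvLowerBGo pts key fuel lo ((lo + hi) / 2)
    else lo

def pvLowerB (pts : List (Int × Int)) (key : Int × Int) (lo hi : Nat) : Nat :=
  pvLowerBGo pts key (hi - lo) lo hi

-- Source B's strip scan `while i < n and pts[i][0] <= cx + gap: …` (getD: i < n keeps the index in
-- range; the fuel argument only makes the loop structural, n - i always suffices).
def pvScanBGo (pts : List (Int × Int)) (n : Nat) (cx cy gap : Int) : Nat → Nat →
    List (Int × Int) → List (Int × Int) → List (Int × Int) × List (Int × Int)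
  | 0, _, visited, queue => (visited, queue)
  | fuel + 1, i, visited, queue =>
    if i < n then
    -- p = pts[i], inlined
      if (pts.getD i (0, 0)).1 ≤ cx + gap then
        if (cy - gap ≤ (pts.getD i (0, 0)).2 ∧ (pts.getD i (0, 0)).2 ≤ cy + gap) ∧
            pts.getD i (0, 0) ∉ visited then
          pvScanBGo pts n cx cy gap fuel (i + 1) (PySem.Set.add visited (pts.getD i (0, 0)))
            (queue ++ [pts.getD i (0, 0)])
        else pvScanBGo pts n cx cy gap fuel (i + 1) visited queue
      else (visited, queue)
    else (visited, queue)

def pvScanB (pts : List (Int × Int)) (n : Nat) (cx cy gap : Int) (i : Nat)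
    (visited queue : List (Int × Int)) : List (Int × Int) × List (Int × Int) :=
  pvScanBGo pts n cx cy gap (n - i) i visited queue

-- Source B's `while head < len(queue):` loop (same fuel device as in port A).
def pvBfsB (pts : List (Int × Int)) (n : Nat) (gap : Int) :
    Nat → Nat → List (Int × Int) → List (Int × Int) →
    List (Int × Int) × List (Int × Int)
  | 0, _, queue, visited => (queue, visited)
  | fuel + 1, head, queue, visited =>
    if head < queue.length then
      let c := queue.getD head (0, 0)
      let lo := pvLowerB pts (c.1 - gap, c.2 - gap) 0 n
      let st := pvScanB pts n c.1 c.2 gap lo visited queue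
      pvBfsB pts n gap fuel (head + 1) st.2 st.1
    else (queue, visited)

def cluster_pixels_grid_py_alt (coords : List (Int × Int)) (gap : Int) : List (List (Int × Int)) :=
  if coords = [] then []
  else
    let pts := PySem.List.sorted2 (PySem.Set.ofList coords) (fun p => p.1) (fun p => p.2)
    let n := pts.length
    (coords.foldl (fun (st : List (Int × Int) × List (List (Int × Int))) pt =>
        if pt ∈ st.1 then st
        else
          let r := pvBfsB pts n gap (coords.length + 1) 0 [pt] (PySem.Set.add st.1 pt)
          (r.2, st.2 ++ [r.1]))
      ([], [])).2

-- ===== PRECONDITION & SPEC =====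
def Spec_cluster_pixels_grid_py (coords : List (Int × Int)) (gap : Int) (out : List (List (Int × Int))) : Prop := out = cluster_pixels_grid_py_alt coords gap
instance (coords : List (Int × Int)) (gap : Int) (out : List (List (Int × Int))) : Decidable (Spec_cluster_pixels_grid_py coords gap out) := by unfold Spec_cluster_pixels_grid_py; infer_instance

-- ===== CLAIM (what is proved, stated in full; the proofs are below) =====
def Claim_equal_cluster_pixels_grid_py : Prop := ∀ (coords : List (Int × Int)) (gap : Int), Dom_cluster_pixels_grid_py coords gap → Spec_cluster_pixels_grid_py coords gap (cluster_pixels_grid_py coords gap)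

-- ===== LEMMAS AND PROOFS =====

-- Strict lexicographic order on int pairs, and the tools about it.
def pvLtP (a b : Int × Int) : Prop := a.1 < b.1 ∨ (a.1 = b.1 ∧ a.2 < b.2)

lemma pvLtP_trans {a b c : Int × Int} (h1 : pvLtP a b) (h2 : pvLtP b c) : pvLtP a c := by
  unfold pvLtP at *; omega

lemma pvLtP_irrefl (a : Int × Int) : ¬ pvLtP a a := by unfold pvLtP; omega

lemma pvLtP_connex {a b : Int × Int} (h1 : ¬ pvLtP a b) (h2 : ¬ pvLtP b a) : a = b := by
  unfold pvLtP at *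
  obtain ⟨x, y⟩ := a; obtain ⟨u, v⟩ := b
  simp only [Prod.mk.injEq]
  constructor <;> omega

-- the `lt` lambda inside PySem.List.sorted2 for keys (·.1), (·.2)
def pvBefore (a b : Int × Int) : Bool :=
  decide (a.1 < b.1) || (!decide (b.1 < a.1) && decide (a.2 < b.2))

lemma pvBefore_iff (a b : Int × Int) : pvBefore a b = true ↔ pvLtP a b := by
  unfold pvBefore pvLtP
  simp only [Bool.or_eq_true, Bool.and_eq_true, Bool.not_eq_true', decide_eq_true_eq,
    decide_eq_false_iff_not]
  omega

lemma pvInsertBy_cons (x y : Int × Int) (t : List (Int × Int)) :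
    PySem.List.insertBy pvBefore x (y :: t) =
      if pvBefore x y then x :: y :: t else y :: PySem.List.insertBy pvBefore x t := rfl

lemma pvInsertBy_pairwise (x : Int × Int) (ys : List (Int × Int))
    (h : ys.Pairwise (fun a b => ¬ pvLtP b a)) :
    (PySem.List.insertBy pvBefore x ys).Pairwise (fun a b => ¬ pvLtP b a) := by
  induction ys with
  | nil => simp [PySem.List.insertBy]
  | cons y t ih =>
    rw [List.pairwise_cons] at h
    obtain ⟨hy, ht⟩ := h
    by_cases hb : pvBefore x y = true
    · have hxy : pvLtP x y := (pvBefore_iff x y).mp hb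
      rw [pvInsertBy_cons, if_pos hb, List.pairwise_cons]
      refine ⟨?_, List.pairwise_cons.mpr ⟨hy, ht⟩⟩
      intro z hz
      rcases List.mem_cons.mp hz with rfl | hz
      · intro hzx; exact pvLtP_irrefl z (pvLtP_trans hzx hxy)
      · intro hzx; exact hy z hz (pvLtP_trans hzx hxy)
    · rw [pvInsertBy_cons, if_neg hb, List.pairwise_cons]
      refine ⟨?_, ih ht⟩
      intro z hz
      rcases (PySem.List.insertBy_mem_iff pvBefore x z t).mp hz with rfl | hz
      · intro hxy
        exact hb ((pvBefore_iff z y).mpr hxy)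
      · exact hy z hz

lemma pvSorted2_pairwise (xs : List (Int × Int)) :
    (PySem.List.sorted2 xs (fun p => p.1) (fun p => p.2)).Pairwise (fun a b => ¬ pvLtP b a) := by
  have key : ∀ (l : List (Int × Int)) (acc : List (Int × Int)),
      acc.Pairwise (fun a b => ¬ pvLtP b a) →
      (l.foldl (fun acc x => PySem.List.insertBy pvBefore x acc) acc).Pairwise
        (fun a b => ¬ pvLtP b a) := by
    intro l
    induction l with
    | nil => intro acc hacc; simpa using hacc
    | cons x t ih =>
      intro acc hacc
      exact ih _ (pvInsertBy_pairwise x acc hacc)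
  exact key xs [] List.Pairwise.nil

-- the sorted distinct point list of port B
def pvPts (coords : List (Int × Int)) : List (Int × Int) :=
  PySem.List.sorted2 (PySem.Set.ofList coords) (fun p => p.1) (fun p => p.2)

lemma pvPts_perm (coords : List (Int × Int)) : (pvPts coords).Perm (PySem.Set.ofList coords) :=
  PySem.List.sorted2_perm _ _ _ _

lemma pvPts_nodup (coords : List (Int × Int)) : (pvPts coords).Nodup :=
  (pvPts_perm coords).nodup_iff.mpr (PySem.Set.nodup_ofList coords)

lemma pvPts_mem (coords : List (Int × Int)) (x : Int × Int) : x ∈ pvPts coords ↔ x ∈ coords := by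
  rw [(pvPts_perm coords).mem_iff, PySem.Set.mem_ofList]

lemma pvPts_pairwise (coords : List (Int × Int)) : (pvPts coords).Pairwise pvLtP := by
  have h1 := pvSorted2_pairwise (PySem.Set.ofList coords)
  have h2 : (pvPts coords).Nodup := pvPts_nodup coords
  exact (h1.and h2).imp (fun {a b} h => by
    by_contra hab
    exact h.2 (pvLtP_connex hab h.1))

-- two strictly sorted lists with the same members are equal
lemma pvStrictExt {l1 l2 : List (Int × Int)} (h1 : l1.Pairwise pvLtP) (h2 : l2.Pairwise pvLtP)
    (hm : ∀ x, x ∈ l1 ↔ x ∈ l2) : l1 = l2 := by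
  have nd1 : l1.Nodup := h1.imp (fun {a b} h => by rintro rfl; exact pvLtP_irrefl a h)
  have nd2 : l2.Nodup := h2.imp (fun {a b} h => by rintro rfl; exact pvLtP_irrefl a h)
  exact List.Perm.eq_of_pairwise
    (fun a b _ _ hab hba => absurd (pvLtP_trans hab hba) (pvLtP_irrefl a)) h1 h2
    ((List.perm_ext_iff_of_nodup nd1 nd2).mpr hm)

-- the common abstract push step: state (visited, queue)
def pvPush (st : List (Int × Int) × List (Int × Int)) (p : Int × Int) :
    List (Int × Int) × List (Int × Int) :=
  if p ∈ st.1 then st else (st.1 ++ [p], st.2 ++ [p])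

-- the box predicate of a popped point (cx, cy)
def pvBoxP (cx cy gap : Int) (p : Int × Int) : Bool :=
  decide (cx - gap ≤ p.1 ∧ p.1 ≤ cx + gap ∧ cy - gap ≤ p.2 ∧ p.2 ≤ cy + gap)

-- A's inner double loop is the pvPush fold over the box members of coordSet
lemma pvInnerA_eq (coordSet : List (Int × Int)) (gap cx cy : Int)
    (st : List (Int × Int) × List (Int × Int)) :
    pvInnerA coordSet gap cx cy st =
      (((PySem.List.pyRange (-gap) (gap + 1) 1).flatMap (fun dx =>
          (PySem.List.pyRange (-gap) (gap + 1) 1).map (fun dy => (cx + dx, cy + dy)))).filter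
        (fun nb => decide (nb ∈ coordSet))).foldl pvPush st := by
  unfold pvInnerA
  rw [PySem.List.foldl_congr_mem _ _
    (fun st1 dx => ((PySem.List.pyRange (-gap) (gap + 1) 1).map (fun dy => (cx + dx, cy + dy))).foldl
      (fun st2 nb => if nb ∈ coordSet ∧ nb ∉ st2.1 then
        (PySem.Set.add st2.1 nb, st2.2 ++ [nb]) else st2) st1) _
    (fun acc dx _ => (List.foldl_map).symm)]
  rw [← List.foldl_flatMap]
  have hbody : ∀ (st2 : List (Int × Int) × List (Int × Int)) (nb : Int × Int),
      (if nb ∈ coordSet ∧ nb ∉ st2.1 then (PySem.Set.add st2.1 nb, st2.2 ++ [nb]) else st2) =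
      (if nb ∈ coordSet then pvPush st2 nb else st2) := by
    intro st2 nb
    by_cases h1 : nb ∈ coordSet
    · by_cases h2 : nb ∈ st2.1
      · simp [h1, h2, pvPush]
      · simp [h1, h2, pvPush]
    · simp [h1]
  rw [PySem.List.foldl_congr_mem _ _ _ _ (fun acc nb _ => hbody acc nb)]
  rw [PySem.List.foldl_ite_eq_foldl_filter (fun nb => nb ∈ coordSet) pvPush]

-- … and that candidate list is exactly pts filtered by the box
lemma pvCandA_eq (coords : List (Int × Int)) (gap cx cy : Int) :
    ((PySem.List.pyRange (-gap) (gap + 1) 1).flatMap (fun dx =>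
        (PySem.List.pyRange (-gap) (gap + 1) 1).map (fun dy => (cx + dx, cy + dy)))).filter
      (fun nb => decide (nb ∈ PySem.Set.ofList coords)) =
    (pvPts coords).filter (pvBoxP cx cy gap) := by
  apply pvStrictExt
  · apply List.Pairwise.filter
    rw [List.pairwise_flatMap]
    constructor
    · intro dx _
      rw [List.pairwise_map]
      exact (PySem.List.pairwise_lt_pyRange_one (-gap) (gap + 1)).imp
        (fun {a b} hab => Or.inr ⟨rfl, by omega⟩)
    · exact (PySem.List.pairwise_lt_pyRange_one (-gap) (gap + 1)).imp
        (fun {dx1 dx2} h12 => by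
          intro x hx y hy
          rw [List.mem_map] at hx hy
          obtain ⟨dy1, _, rfl⟩ := hx
          obtain ⟨dy2, _, rfl⟩ := hy
          exact Or.inl (by omega))
  · exact (pvPts_pairwise coords).filter _
  · intro x
    simp only [List.mem_filter, List.mem_flatMap, List.mem_map, PySem.List.mem_pyRange_one,
      PySem.Set.mem_ofList, pvPts_mem, pvBoxP, decide_eq_true_eq]
    constructor
    · rintro ⟨⟨dx, hdx, dy, hdy, rfl⟩, hmem⟩
      exact ⟨hmem, by omega⟩
    · rintro ⟨hmem, hbox⟩
      exact ⟨⟨x.1 - cx, by omega, x.2 - cy, by omega, by simp⟩, hmem⟩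

lemma pvTupLt_iff (a b : Int × Int) : pvTupLt a b = true ↔ pvLtP a b := by
  unfold pvTupLt pvLtP
  exact decide_eq_true_iff

-- binary-search lower bound specification
lemma pvLowerB_spec (pts : List (Int × Int)) (key : Int × Int) (hs : pts.Pairwise pvLtP)
    (lo hi : Nat) (hlohi : lo ≤ hi) (hhin : hi ≤ pts.length)
    (hlo : ∀ j (hj : j < pts.length), j < lo → pvLtP pts[j] key)
    (hhi : ∀ j (hj : j < pts.length), hi ≤ j → ¬ pvLtP pts[j] key) :
    (∀ j (hj : j < pts.length), j < pvLowerB pts key lo hi → pvLtP pts[j] key) ∧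
    (∀ j (hj : j < pts.length), pvLowerB pts key lo hi ≤ j → ¬ pvLtP pts[j] key) := by
  have main : ∀ (k lo hi : Nat), hi - lo ≤ k → lo ≤ hi → hi ≤ pts.length →
      (∀ j (hj : j < pts.length), j < lo → pvLtP pts[j] key) →
      (∀ j (hj : j < pts.length), hi ≤ j → ¬ pvLtP pts[j] key) →
      (∀ j (hj : j < pts.length), j < pvLowerBGo pts key k lo hi → pvLtP pts[j] key) ∧
      (∀ j (hj : j < pts.length), pvLowerBGo pts key k lo hi ≤ j → ¬ pvLtP pts[j] key) := by
    intro k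
    induction k with
    | zero =>
      intro lo hi hk hle hlen hlo hhi
      have heq : lo = hi := by omega
      simp only [pvLowerBGo]
      exact ⟨hlo, fun j hj hge => hhi j hj (by omega)⟩
    | succ k ih =>
      intro lo hi hk hle hlen hlo hhi
      simp only [pvLowerBGo]
      by_cases h : lo < hi
      · rw [if_pos h]
        have hmidlt : (lo + hi) / 2 < pts.length := by omega
        rw [List.getD_eq_getElem pts (0, 0) hmidlt]
        by_cases ht : pvTupLt pts[(lo + hi) / 2] key = true
        · rw [if_pos ht]
          have hmid : pvLtP pts[(lo + hi) / 2] key := (pvTupLt_iff _ _).mp ht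
          refine ih ((lo + hi) / 2 + 1) hi (by omega) (by omega) hlen ?_ hhi
          intro j hj hjlt
          rcases Nat.lt_or_ge j ((lo + hi) / 2) with hj2 | hj2
          · exact pvLtP_trans (List.pairwise_iff_getElem.mp hs j _ hj hmidlt hj2) hmid
          · have : j = (lo + hi) / 2 := by omega
            subst this; exact hmid
        · rw [if_neg ht]
          have hmid : ¬ pvLtP pts[(lo + hi) / 2] key := fun hp => ht ((pvTupLt_iff _ _).mpr hp)
          refine ih lo ((lo + hi) / 2) (by omega) (by omega) (by omega) hlo ?_
          intro j hj hge
          rcases Nat.lt_or_ge ((lo + hi) / 2) j with hj2 | hj2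
          · intro hp
            exact hmid (pvLtP_trans (List.pairwise_iff_getElem.mp hs _ j hmidlt hj hj2) hp)
          · have : j = (lo + hi) / 2 := by omega
            subst this; exact hmid
      · rw [if_neg h]
        have heq : lo = hi := by omega
        exact ⟨hlo, fun j hj hge => hhi j hj (by omega)⟩
  exact main (hi - lo) lo hi (le_refl _) hlohi hhin hlo hhi

-- the scan is the pvPush fold over the y-filtered x-strip
lemma pvScanB_eq (pts : List (Int × Int)) (cx cy gap : Int) :
    ∀ i visited queue,
      pvScanB pts pts.length cx cy gap i visited queue =
        (((pts.drop i).takeWhile (fun p => decide (p.1 ≤ cx + gap))).filter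
          (fun p => decide (cy - gap ≤ p.2 ∧ p.2 ≤ cy + gap))).foldl pvPush (visited, queue) := by
  have main : ∀ (fuel i : Nat) (visited queue : List (Int × Int)), pts.length - i ≤ fuel →
      pvScanBGo pts pts.length cx cy gap fuel i visited queue =
        (((pts.drop i).takeWhile (fun p => decide (p.1 ≤ cx + gap))).filter
          (fun p => decide (cy - gap ≤ p.2 ∧ p.2 ≤ cy + gap))).foldl pvPush (visited, queue) := by
    intro fuel
    induction fuel with
    | zero =>
      intro i visited queue hk
      rw [List.drop_eq_nil_of_le (by omega)]
      rfl
    | succ fuel ihk =>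
      intro i visited queue hk
      simp only [pvScanBGo]
      by_cases h : i < pts.length
      · rw [if_pos h, List.getD_eq_getElem pts (0, 0) h,
          List.drop_eq_getElem_cons h, List.takeWhile_cons]
        by_cases hx : pts[i].1 ≤ cx + gap
        · simp only [hx, decide_true, if_true, List.filter_cons]
          by_cases hy : cy - gap ≤ pts[i].2 ∧ pts[i].2 ≤ cy + gap
          · simp only [hy, and_true, true_and, decide_true, if_true, List.foldl_cons]
            by_cases hv : pts[i] ∈ visited
            · rw [if_neg (fun hcon => hcon hv)]
              rw [ihk (i + 1) visited queue (by omega)]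
              have : pvPush (visited, queue) pts[i] = (visited, queue) := by simp [pvPush, hv]
              rw [this]
            · rw [if_pos hv]
              rw [ihk (i + 1) _ _ (by omega)]
              have : pvPush (visited, queue) pts[i] = (visited ++ [pts[i]], queue ++ [pts[i]]) := by
                simp [pvPush, hv]
              rw [this, PySem.Set.add_of_not_mem hv]
          · have hy' : decide (cy - gap ≤ pts[i].2 ∧ pts[i].2 ≤ cy + gap) = false := by
              simpa using hy
            simp only [hy', Bool.false_eq_true, if_false]
            rw [if_neg (fun hcon => hy hcon.1)]
            exact ihk (i + 1) visited queue (by omega)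
        · have hx' : decide (pts[i].1 ≤ cx + gap) = false := by simpa using hx
          simp only [hx', Bool.false_eq_true, if_false, if_neg hx]
          rfl
      · rw [if_neg h, List.drop_eq_nil_of_le (by omega)]
        rfl
  intro i visited queue
  exact main (pts.length - i) i visited queue (le_refl _)

-- takeWhile = filter along a list on which the predicate can only switch off
lemma pvTakeWhile_eq_filter (p : Int × Int → Bool) :
    ∀ (l : List (Int × Int)), l.Pairwise (fun a b => p b = true → p a = true) →
      l.takeWhile p = l.filter p := by
  intro l
  induction l with
  | nil => intro _; rfl
  | cons a t ih =>
    intro h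
    rw [List.pairwise_cons] at h
    obtain ⟨ha, ht⟩ := h
    by_cases pa : p a = true
    · simp [pa, ih ht]
    · have : t.filter p = [] := List.filter_eq_nil_iff.mpr (fun b hb hpb => pa (ha b hb hpb))
      simp [pa, this]

-- strip starting at the lower bound, filtered on y, is the box filter
lemma pvStrip_eq (coords : List (Int × Int)) (gap cx cy : Int) :
    (((pvPts coords).drop (pvLowerB (pvPts coords) (cx - gap, cy - gap) 0 (pvPts coords).length)).takeWhile
        (fun p => decide (p.1 ≤ cx + gap))).filter
      (fun p => decide (cy - gap ≤ p.2 ∧ p.2 ≤ cy + gap)) =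
    (pvPts coords).filter (pvBoxP cx cy gap) := by
  set P := pvPts coords with hP
  set r := pvLowerB P (cx - gap, cy - gap) 0 P.length with hr
  have hs : P.Pairwise pvLtP := pvPts_pairwise coords
  obtain ⟨hbef, haft⟩ := pvLowerB_spec P (cx - gap, cy - gap) hs 0 P.length
    (Nat.zero_le _) (le_refl _) (fun j hj hlt => absurd hlt (by omega))
    (fun j hj hge => absurd hj (by omega))
  have hdrop_pw : (P.drop r).Pairwise pvLtP := List.Pairwise.sublist (List.drop_sublist r P) hs
  -- on the strip the x-bound predicate can only switch off
  rw [pvTakeWhile_eq_filter _ _ (hdrop_pw.imp (fun {a b} hab => by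
    simp only [decide_eq_true_eq]
    intro hb
    rcases hab with h1 | ⟨h1, _⟩ <;> omega))]
  rw [List.filter_filter]
  -- decompose P as take r ++ drop r
  conv_rhs => rw [← List.take_append_drop r P, List.filter_append]
  have htake : (P.take r).filter (pvBoxP cx cy gap) = [] := by
    rw [List.filter_eq_nil_iff]
    intro a ha
    rw [List.mem_take_iff_getElem] at ha
    obtain ⟨j, hj, rfl⟩ := ha
    have hlt : pvLtP P[j] (cx - gap, cy - gap) := hbef j (by omega) (by omega)
    unfold pvLtP at hlt
    simp only [pvBoxP, decide_eq_true_eq, not_and, not_le]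
    intro h1 h2 h3
    simp only at hlt
    omega
  rw [htake, List.nil_append]
  -- on drop r, the box predicate is the x-high ∧ y-range predicate
  apply List.filter_congr
  intro x hx
  rw [List.mem_iff_getElem] at hx
  obtain ⟨m, hm, rfl⟩ := hx
  have hmlen : r + m < P.length := by
    have := hm
    rw [List.length_drop] at this
    omega
  rw [List.getElem_drop]
  have hge : ¬ pvLtP P[r + m] (cx - gap, cy - gap) := haft (r + m) hmlen (by omega)
  unfold pvLtP at hge
  simp only [not_or, not_and, not_lt] at hge
  simp [pvBoxP, hge.1]
  cases decide (cy ≤ P[r + m].2 + gap) <;> cases decide (P[r + m].2 ≤ cy + gap) <;>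
    cases decide (P[r + m].1 ≤ cx + gap) <;> rfl

-- the fold of pvPush appends the same fresh suffix to visited and to the queue
def pvNew : List (Int × Int) → List (Int × Int) → List (Int × Int)
  | [], _ => []
  | p :: t, v => if p ∈ v then pvNew t v else p :: pvNew t (v ++ [p])

lemma pvFoldPush : ∀ (cand v q : List (Int × Int)),
    cand.foldl pvPush (v, q) = (v ++ pvNew cand v, q ++ pvNew cand v) := by
  intro cand
  induction cand with
  | nil => intro v q; simp [pvNew]
  | cons p t ih =>
    intro v q
    by_cases hp : p ∈ v
    · simp [List.foldl_cons, pvPush, hp, pvNew, ih]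
    · simp only [List.foldl_cons, pvPush, hp, if_false, pvNew]
      rw [ih (v ++ [p]) (q ++ [p])]
      simp [List.append_assoc]

lemma pvNew_subset : ∀ (cand v : List (Int × Int)), ∀ x ∈ pvNew cand v, x ∈ cand := by
  intro cand
  induction cand with
  | nil => intro v x hx; simp [pvNew] at hx
  | cons p t ih =>
    intro v x hx
    by_cases hp : p ∈ v
    · simp only [pvNew, if_pos hp] at hx
      exact List.mem_cons_of_mem p (ih v x hx)
    · simp only [pvNew, if_neg hp, List.mem_cons] at hx
      rcases hx with rfl | hx
      · exact List.mem_cons_self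
      · exact List.mem_cons_of_mem p (ih (v ++ [p]) x hx)

lemma pvNew_nodup : ∀ (cand v : List (Int × Int)), v.Nodup → (v ++ pvNew cand v).Nodup := by
  intro cand
  induction cand with
  | nil => intro v hv; simpa [pvNew] using hv
  | cons p t ih =>
    intro v hv
    by_cases hp : p ∈ v
    · simpa [pvNew, if_pos hp] using ih v hv
    · have hv2 : (v ++ [p]).Nodup := by
        rw [List.nodup_append]
        refine ⟨hv, List.nodup_singleton p, ?_⟩
        intro a ha b hb
        rw [List.mem_singleton] at hb
        subst hb
        exact fun h => hp (h ▸ ha)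
      have := ih (v ++ [p]) hv2
      simpa [pvNew, if_neg hp, List.append_assoc] using this

lemma pvLen_le (coords l : List (Int × Int)) (h1 : l.Nodup) (h2 : l ⊆ coords) :
    l.length ≤ (PySem.Set.ofList coords).length := by
  calc l.length = l.toFinset.card := (List.toFinset_card_of_nodup h1).symm
    _ ≤ coords.toFinset.card := Finset.card_le_card (by
        intro x hx
        rw [List.mem_toFinset] at *
        exact h2 hx)
    _ = (PySem.Set.ofList coords).toFinset.card := by
        congr 1
        ext x
        simp [List.mem_toFinset, PySem.Set.mem_ofList]
    _ = (PySem.Set.ofList coords).length :=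
        List.toFinset_card_of_nodup (PySem.Set.nodup_ofList coords)

-- the aligned BFS loops
lemma pvBfs_eq (coords : List (Int × Int)) (gap : Int) :
    ∀ (fuel head : Nat) (queue visited : List (Int × Int)),
      visited.Nodup → queue.Sublist visited → queue ⊆ coords →
      (PySem.Set.ofList coords).length + 1 ≤ head + fuel →
      pvBfsA (PySem.Set.ofList coords) gap fuel (queue.drop head) visited (queue.take head) =
        pvBfsB (pvPts coords) (pvPts coords).length gap fuel head queue visited ∧
      (pvBfsB (pvPts coords) (pvPts coords).length gap fuel head queue visited).2.Nodup := by
  intro fuel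
  induction fuel with
  | zero =>
    intro head queue visited hv hsub hsubc hbound
    have hql : queue.length ≤ (PySem.Set.ofList coords).length :=
      pvLen_le coords queue (hv.sublist hsub) hsubc
    simp only [pvBfsA, pvBfsB]
    exact ⟨by rw [List.take_of_length_le (by omega)], hv⟩
  | succ fuel ih =>
    intro head queue visited hv hsub hsubc hbound
    simp only [pvBfsB]
    by_cases hh : head < queue.length
    · rw [if_pos hh]
      rw [List.drop_eq_getElem_cons hh, List.getD_eq_getElem queue (0, 0) hh]
      simp only [pvBfsA]
      rw [pvInnerA_eq, pvCandA_eq, pvFoldPush]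
      rw [pvScanB_eq, pvStrip_eq, pvFoldPush]
      set c := queue[head] with hc
      set Δ := pvNew ((pvPts coords).filter (pvBoxP c.1 c.2 gap)) visited with hΔ
      have hsubc' : (queue ++ Δ) ⊆ coords := by
        intro x hx
        rcases List.mem_append.mp hx with hx | hx
        · exact hsubc hx
        · have := pvNew_subset _ _ x hx
          rw [List.mem_filter] at this
          exact (pvPts_mem coords x).mp this.1
      have IH := ih (head + 1) (queue ++ Δ) (visited ++ Δ)
        (pvNew_nodup _ visited hv)
        (hsub.append (List.Sublist.refl Δ))
        hsubc'
        (by omega)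
      rw [List.drop_append_of_le_length (by omega),
          List.take_append_of_le_length (by omega),
          List.take_add_one] at IH
      simp only [List.getElem?_eq_getElem hh, Option.toList_some] at IH
      exact IH
    · rw [if_neg hh]
      rw [List.drop_eq_nil_of_le (by omega)]
      simp only [pvBfsA]
      exact ⟨by rw [List.take_of_length_le (by omega)], hv⟩

-- the outer `for pt in coords:` folds agree step by step
lemma pvOuter_eq (coords : List (Int × Int)) (gap : Int) :
    ∀ (rest : List (Int × Int)) (visited : List (Int × Int)) (acc : List (List (Int × Int))),
      visited.Nodup → rest ⊆ coords →
      rest.foldl (fun (st : List (Int × Int) × List (List (Int × Int))) pt =>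
          if pt ∈ st.1 then st
          else
            let r := pvBfsA (PySem.Set.ofList coords) gap (coords.length + 1) [pt]
              (PySem.Set.add st.1 pt) []
            (r.2, st.2 ++ [r.1])) (visited, acc) =
      rest.foldl (fun (st : List (Int × Int) × List (List (Int × Int))) pt =>
          if pt ∈ st.1 then st
          else
            let r := pvBfsB (pvPts coords) (pvPts coords).length gap (coords.length + 1) 0 [pt]
              (PySem.Set.add st.1 pt)
            (r.2, st.2 ++ [r.1])) (visited, acc) := by
  intro rest
  induction rest with
  | nil => intro visited acc _ _; rfl
  | cons pt rest ih =>
    intro visited acc hv hsubc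
    have hpt : pt ∈ coords := hsubc List.mem_cons_self
    have hrest : rest ⊆ coords := fun x hx => hsubc (List.mem_cons_of_mem pt hx)
    simp only [List.foldl_cons]
    by_cases hmem : pt ∈ visited
    · simp only [if_pos hmem]
      exact ih visited acc hv hrest
    · simp only [if_neg hmem]
      have hadd : PySem.Set.add visited pt = visited ++ [pt] := PySem.Set.add_of_not_mem hmem
      have hvadd : (visited ++ [pt]).Nodup := by
        rw [List.nodup_append]
        refine ⟨hv, List.nodup_singleton pt, ?_⟩
        intro a ha b hb
        rw [List.mem_singleton] at hb
        subst hb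
        exact fun h => hmem (h ▸ ha)
      have H := pvBfs_eq coords gap (coords.length + 1) 0 [pt] (visited ++ [pt])
        hvadd
        (List.sublist_append_right visited [pt])
        (fun x hx => by rw [List.mem_singleton] at hx; exact hx ▸ hpt)
        (by have := PySem.Set.length_ofList_le coords; omega)
      simp only [List.drop_zero, List.take_zero] at H
      rw [hadd]
      rw [H.1]
      exact ih _ _ H.2 hrest

-- ===== VERDICT (by name: the statement is the Claim_ definition above) =====
theorem cluster_pixels_grid_py_spec : Claim_equal_cluster_pixels_grid_py := by
  intro coords gap _
  unfold Spec_cluster_pixels_grid_py cluster_pixels_grid_py cluster_pixels_grid_py_alt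
  by_cases hc : coords = []
  · simp [hc]
  · simp only [if_neg hc]
    rw [pvOuter_eq coords gap coords [] [] List.nodup_nil (fun _ h => h)]
    rfl
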